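-- pv_equiv track=rewrite | github.com/tezeladata/Transfer | pos_systems.py | dec_to_system
-- ===== SOURCE A (Python) =====
-- def dec_to_system(num, system):
--     if system not in [2, 8, 16]: return -1
--
--     digits = "0123456789ABCDEF"
--     res = ""
--
--     if num == 0: return "0"
--
--     while num > 0:
--         res += digits[num % system]
--         num //= system
--
--     res = res[::-1]
--     return res
-- ===== SOURCE B (Python) =====
-- def dec_to_system(num, system):
--     if system not in [2, 8, 16]:
--         return -1
--     if num == 0:
--         return "0"
--     digits = "0123456789ABCDEF"
--     # build the list of powers of `system` not exceeding num, then read the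
--     # digits top-down: the digit at weight p is (num // p) % system
--     powers = []
--     p = 1
--     while p <= num:
--         powers.append(p)
--         p *= system
--     return "".join(digits[(num // p) % system] for p in reversed(powers))
-- ===== Notes on version B (the rewrite author's own statement) =====
-- stated objective: alternative
-- what changed: Replaces A's destructive while-loop that divides num, accumulates digits least-significant-first and reverses the string, with a two-stage algorithm: first build the list of powers of the base not exceeding num, then read each digit directly as (num // p) % system from the largest power down, so num is never mutated and no reversal of the result exists.
-- outside the precondition, e.g. on dec_to_system(5, 10): A returns -1, B returns -1
import Mathlib
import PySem

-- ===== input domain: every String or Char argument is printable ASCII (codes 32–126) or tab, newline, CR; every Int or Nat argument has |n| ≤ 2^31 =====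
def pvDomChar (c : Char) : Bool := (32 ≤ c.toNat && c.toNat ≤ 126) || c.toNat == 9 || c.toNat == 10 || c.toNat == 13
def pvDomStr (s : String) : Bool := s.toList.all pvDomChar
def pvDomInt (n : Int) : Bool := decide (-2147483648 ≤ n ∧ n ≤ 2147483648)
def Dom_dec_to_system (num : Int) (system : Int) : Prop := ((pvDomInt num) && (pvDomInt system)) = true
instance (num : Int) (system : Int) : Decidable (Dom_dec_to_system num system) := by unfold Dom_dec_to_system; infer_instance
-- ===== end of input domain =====

-- B replaces A's divide-and-reverse digit loop with a powers-of-base table read top-down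
-- (digit at weight p is (num // p) % system); alternative decomposition, same cost.


-- digits = "0123456789ABCDEF" (shared constant of both Pythons)
def pvDigits : List Char := "0123456789ABCDEF".toList

-- termination measure fact cited by port A's decreasing_by
theorem pv_floordiv_toNat_lt (num system : Int) (h : 0 < num ∧ 2 ≤ system) :
    (PySem.Int.floordiv num system).toNat < num.toNat := by
  have hs : (0:Int) < system := by omega
  have h1 : PySem.Int.floordiv num system < num :=
    (PySem.Int.floordiv_lt_iff_lt_mul hs).mpr (by nlinarith [h.1, h.2])
  have h2 : (0:Int) ≤ PySem.Int.floordiv num system :=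
    (PySem.Int.le_floordiv_iff_mul_le hs).mpr (by nlinarith [h.1, h.2])
  omega

-- ===== PORT A =====
-- the 'while num > 0' loop: res += digits[num % system]; num //= system.
-- '2 ≤ system' in the guard is a totality guard only: the loop is reached only with
-- system ∈ {2,8,16}; '.getD ' '' is unreachable (0 ≤ num % system < system ≤ 16).
def decLoop (system : Int) (num : Int) (res : List Char) : List Char :=
  if h : 0 < num ∧ 2 ≤ system then
    decLoop system (PySem.Int.floordiv num system)
      (res ++ [(PySem.List.pyGet? pvDigits (PySem.Int.mod num system)).getD ' '])
  else res
termination_by num.toNat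
decreasing_by exact pv_floordiv_toNat_lt num system h

def dec_to_system (num : Int) (system : Int) : String :=
  -- Python returns the int -1 here, which is not a String; outside Pre_ (see Pre_ comment)
  if ¬ (system = 2 ∨ system = 8 ∨ system = 16) then "-1"
  else if num = 0 then "0"
  else String.ofList ((decLoop system num []).reverse)   -- res = res[::-1]; return res

-- ===== PORT B =====
-- B's first stage: 'p = 1; while p <= num: powers.append(p); p *= system'.
-- '2 ≤ system ∧ 1 ≤ p' are totality guards only: the loop is reached only with
-- system ∈ {2,8,16} and p starting at 1.
def pvPowers (num : Int) (system : Int) (p : Int) : List Int :=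
  if h : p ≤ num ∧ 2 ≤ system ∧ 1 ≤ p then
    p :: pvPowers num system (p * system)
  else []
termination_by (num + 1 - p).toNat
decreasing_by
  have : p < p * system := by nlinarith [h.2.1, h.2.2]
  omega

def dec_to_system_alt (num : Int) (system : Int) : String :=
  if ¬ (system = 2 ∨ system = 8 ∨ system = 16) then "-1"
  else if num = 0 then "0"
  else
    -- "".join(digits[(num // p) % system] for p in reversed(powers))
    String.ofList ((pvPowers num system 1).reverse.map (fun p =>
      (PySem.List.pyGet? pvDigits
        (PySem.Int.mod (PySem.Int.floordiv num p) system)).getD ' '))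

-- ===== PRECONDITION & SPEC =====
-- Pre_ excludes only system ∉ {2,8,16}, where Python A (and B) return the int -1 — not a value of
-- the declared String return type.
def Pre_dec_to_system (num : Int) (system : Int) : Prop :=
  system = 2 ∨ system = 8 ∨ system = 16
instance (num : Int) (system : Int) : Decidable (Pre_dec_to_system num system) := by
  unfold Pre_dec_to_system; infer_instance
def pvWitness_dec_to_system : Int × Int := (255, 16)

def Spec_dec_to_system (num : Int) (system : Int) (out : String) : Prop := out = dec_to_system_alt num system
instance (num : Int) (system : Int) (out : String) : Decidable (Spec_dec_to_system num system out) := by unfold Spec_dec_to_system; infer_instance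

-- ===== CLAIM (what is proved, stated in full; the proofs are below) =====
def Claim_equal_dec_to_system : Prop := ∀ (num : Int) (system : Int), Dom_dec_to_system num system → Pre_dec_to_system num system → Spec_dec_to_system num system (dec_to_system num system)

-- ===== LEMMAS AND PROOFS =====

-- accumulator lemma for A's loop
theorem decLoop_acc (system num : Int) (res : List Char) :
    decLoop system num res = res ++ decLoop system num [] := by
  by_cases h : 0 < num ∧ 2 ≤ system
  · conv_lhs => rw [decLoop]
    conv_rhs => rw [decLoop]
    rw [dif_pos h, dif_pos h,
      decLoop_acc system (PySem.Int.floordiv num system)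
        (res ++ [(PySem.List.pyGet? pvDigits (PySem.Int.mod num system)).getD ' ']),
      decLoop_acc system (PySem.Int.floordiv num system)
        ([] ++ [(PySem.List.pyGet? pvDigits (PySem.Int.mod num system)).getD ' '])]
    simp
  · conv_lhs => rw [decLoop]
    conv_rhs => rw [decLoop]
    rw [dif_neg h, dif_neg h]; simp
termination_by num.toNat
decreasing_by all_goals exact pv_floordiv_toNat_lt num system h

-- floor division by a product, positive divisors
theorem pv_floordiv_floordiv (n a b : Int) (ha : 0 < a) (hb : 0 < b) :
    PySem.Int.floordiv (PySem.Int.floordiv n a) b = PySem.Int.floordiv n (a * b) := by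
  rw [PySem.Int.floordiv_eq_ediv_of_pos ha, PySem.Int.floordiv_eq_ediv_of_pos hb,
    PySem.Int.floordiv_eq_ediv_of_pos (by positivity), Int.ediv_ediv_of_nonneg (le_of_lt ha)]

-- the key invariant: A's loop run on num // p yields exactly B's digits for powers ≥ p
theorem decLoop_powers (num system p : Int) (hs : 2 ≤ system) (hp : 1 ≤ p) :
    (decLoop system (PySem.Int.floordiv num p) []).reverse
      = (pvPowers num system p).reverse.map (fun q =>
          (PySem.List.pyGet? pvDigits
            (PySem.Int.mod (PySem.Int.floordiv num q) system)).getD ' ') := by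
  by_cases h : p ≤ num
  · have hm : 0 < PySem.Int.floordiv num p :=
      (PySem.Int.le_floordiv_iff_mul_le (by omega)).mpr (by omega)
    conv_lhs => rw [decLoop]
    rw [dif_pos ⟨hm, hs⟩, decLoop_acc, pv_floordiv_floordiv num p system (by omega) (by omega)]
    conv_rhs => rw [pvPowers]
    rw [dif_pos ⟨h, hs, hp⟩]
    simp only [List.reverse_cons, List.map_append, List.map_cons,
      List.map_nil, List.nil_append, List.singleton_append]
    rw [decLoop_powers num system (p * system) hs (by nlinarith)]
  · have hm : PySem.Int.floordiv num p ≤ 0 := by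
      have := (PySem.Int.floordiv_lt_iff_lt_mul (a := num) (q := 1) (show (0:Int) < p by omega)).mpr
        (by omega)
      omega
    conv_lhs => rw [decLoop]
    rw [dif_neg (by omega)]
    conv_rhs => rw [pvPowers]
    rw [dif_neg (by intro hc; exact h hc.1)]
    simp
termination_by (num + 1 - p).toNat
decreasing_by
  have : p < p * system := by nlinarith
  omega

theorem pv_floordiv_one (n : Int) : PySem.Int.floordiv n 1 = n := by
  rw [PySem.Int.floordiv_eq_ediv_of_pos (by norm_num)]; simp

-- ===== VERDICT (by name: the statement is the Claim_ definition above) =====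
theorem dec_to_system_spec : Claim_equal_dec_to_system := by
  intro num system _ hpre
  have hp : system = 2 ∨ system = 8 ∨ system = 16 := hpre
  unfold Spec_dec_to_system dec_to_system dec_to_system_alt
  have hs : 2 ≤ system := by rcases hp with h|h|h <;> omega
  by_cases h0 : num = 0
  · simp [h0]
  · rw [if_neg (not_not_intro hp), if_neg h0, if_neg (not_not_intro hp), if_neg h0]
    have := decLoop_powers num system 1 hs (by omega)
    rw [pv_floordiv_one] at this
    rw [this]
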